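-- pv_equiv track=rewrite | github.com/id4thomas/CNGCI | 2_story_completion/src/subject_extractor.py | determine_subject_change
-- ===== SOURCE A (Python) =====
-- from typing import List, Tuple
--
-- def determine_subject_change(subjects: List[dict], idx1: int, idx2: int):
-- 	subj1_cluster_id = -1
-- 	subj2_cluster_id = -1
-- 	for subject in subjects:
-- 		if idx1==subject["sentence_idx"]:
-- 			subj1_cluster_id = subject["cluster_id"]
-- 		elif idx2==subject["sentence_idx"]:
-- 			subj2_cluster_id = subject["cluster_id"]
--
-- 	if subj1_cluster_id==-1 or subj2_cluster_id==-1: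
-- 		return False ## assume no subject change
-- 	elif subj1_cluster_id!=subj2_cluster_id:
-- 		return True
-- 	else:
-- 		return False
-- ===== SOURCE B (Python) =====
-- def _last_cluster_of(subjects, idx):
--     """Last-wins: scan from the back and stop at the first record matching idx."""
--     for subject in reversed(subjects):
--         if subject["sentence_idx"] == idx:
--             return subject["cluster_id"]
--     return -1
--
-- def determine_subject_change(subjects, idx1, idx2):
--     c1 = _last_cluster_of(subjects, idx1)
--     c2 = _last_cluster_of(subjects, idx2)
--     return c1 != -1 and c2 != -1 and c1 != c2
-- ===== Notes on version B (the rewrite author's own statement) =====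
-- stated objective: alternative
-- what changed: B replaces A's single forward pass with two mutable accumulators and elif precedence by two independent backward early-exit searches (first match from the back = last-wins), combined by one boolean expression.
import Mathlib
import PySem

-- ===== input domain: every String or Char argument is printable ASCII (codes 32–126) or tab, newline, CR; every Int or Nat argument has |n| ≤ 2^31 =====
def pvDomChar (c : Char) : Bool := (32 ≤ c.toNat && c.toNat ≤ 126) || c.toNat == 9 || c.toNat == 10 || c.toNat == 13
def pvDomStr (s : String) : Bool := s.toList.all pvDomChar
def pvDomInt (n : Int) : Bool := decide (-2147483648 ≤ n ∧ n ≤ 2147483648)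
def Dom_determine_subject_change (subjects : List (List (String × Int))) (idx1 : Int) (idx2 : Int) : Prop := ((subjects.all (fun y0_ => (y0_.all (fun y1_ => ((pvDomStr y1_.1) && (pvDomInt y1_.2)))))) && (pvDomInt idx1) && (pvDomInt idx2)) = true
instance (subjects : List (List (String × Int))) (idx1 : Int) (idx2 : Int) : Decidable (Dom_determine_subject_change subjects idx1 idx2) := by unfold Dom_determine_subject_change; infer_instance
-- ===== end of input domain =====

-- B replaces A's forward pass with two accumulators by two independent backward early-exit
-- searches (first match from the back = last-wins) combined by one boolean expression (alternative).


-- shared helper: Python dict lookup on an association list (first match), subject["k"]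
def pvKey? (s : List (String × Int)) (k : String) : Option Int :=
  (s.find? (fun p => p.1 == k)).map (·.2)

-- ===== PORT A =====
-- A's forward loop over (subj1_cluster_id, subj2_cluster_id); key misses (Python KeyError) are excluded by Pre_
def determine_subject_change (subjects : List (List (String × Int))) (idx1 : Int) (idx2 : Int) : Bool :=
  let st := subjects.foldl (fun (st : Int × Int) subject =>
    match pvKey? subject "sentence_idx" with
    | none => st  -- Python raises KeyError here; outside Pre_
    | some si =>
      if idx1 = si then
        match pvKey? subject "cluster_id" with
        | none => st  -- KeyError; outside Pre_
        | some c => (c, st.2)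
      else if idx2 = si then
        match pvKey? subject "cluster_id" with
        | none => st  -- KeyError; outside Pre_
        | some c => (st.1, c)
      else st) (-1, -1)
  if st.1 = -1 ∨ st.2 = -1 then false
  else if st.1 ≠ st.2 then true
  else false

-- ===== PORT B =====
-- Source B's _last_cluster_of: scan the reversed list, return at the first match
def pvLastClusterOf (idx : Int) : List (List (String × Int)) → Int
  | [] => -1
  | s :: rest =>
    match pvKey? s "sentence_idx" with
    | none => pvLastClusterOf idx rest  -- Python raises KeyError here; outside Pre_
    | some si =>
      if si = idx then
        match pvKey? s "cluster_id" with
        | none => -1  -- KeyError; outside Pre_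
        | some c => c
      else pvLastClusterOf idx rest

def determine_subject_change_alt (subjects : List (List (String × Int))) (idx1 : Int) (idx2 : Int) : Bool :=
  let c1 := pvLastClusterOf idx1 subjects.reverse
  let c2 := pvLastClusterOf idx2 subjects.reverse
  c1 != -1 && c2 != -1 && c1 != c2

-- ===== PRECONDITION & SPEC =====
-- Pre_ excludes exactly the inputs on which Python A raises KeyError: a record missing the
-- "sentence_idx" key (A reads it from every record), or a record whose sentence_idx equals idx1
-- or idx2 but which misses the "cluster_id" key.
def Pre_determine_subject_change (subjects : List (List (String × Int))) (idx1 : Int) (idx2 : Int) : Prop :=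
  (subjects.all (fun s =>
    match pvKey? s "sentence_idx" with
    | none => false
    | some si => !(si == idx1 || si == idx2) || (pvKey? s "cluster_id").isSome)) = true
instance (subjects : List (List (String × Int))) (idx1 : Int) (idx2 : Int) : Decidable (Pre_determine_subject_change subjects idx1 idx2) := by unfold Pre_determine_subject_change; infer_instance

def pvWitness_determine_subject_change : (List (List (String × Int))) × Int × Int :=
  ([[("sentence_idx", 0), ("cluster_id", 1)], [("sentence_idx", 1), ("cluster_id", 2)]], 0, 1)

def Spec_determine_subject_change (subjects : List (List (String × Int))) (idx1 : Int) (idx2 : Int) (out : Bool) : Prop := out = determine_subject_change_alt subjects idx1 idx2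
instance (subjects : List (List (String × Int))) (idx1 : Int) (idx2 : Int) (out : Bool) : Decidable (Spec_determine_subject_change subjects idx1 idx2 out) := by unfold Spec_determine_subject_change; infer_instance

-- ===== CLAIM (what is proved, stated in full; the proofs are below) =====
def Claim_equal_determine_subject_change : Prop := ∀ (subjects : List (List (String × Int))) (idx1 : Int) (idx2 : Int), Dom_determine_subject_change subjects idx1 idx2 → Pre_determine_subject_change subjects idx1 idx2 → Spec_determine_subject_change subjects idx1 idx2 (determine_subject_change subjects idx1 idx2)

-- ===== LEMMAS AND PROOFS =====

-- abbreviation for A's fold body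
def stepA (idx1 idx2 : Int) (st : Int × Int) (subject : List (String × Int)) : Int × Int :=
  match pvKey? subject "sentence_idx" with
  | none => st
  | some si =>
    if idx1 = si then
      match pvKey? subject "cluster_id" with
      | none => st
      | some c => (c, st.2)
    else if idx2 = si then
      match pvKey? subject "cluster_id" with
      | none => st
      | some c => (st.1, c)
    else st

lemma portA_eq (subjects : List (List (String × Int))) (idx1 idx2 : Int) :
    determine_subject_change subjects idx1 idx2 =
      (let st := subjects.foldl (stepA idx1 idx2) (-1, -1)
       if st.1 = -1 ∨ st.2 = -1 then false else if st.1 ≠ st.2 then true else false) := rfl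

-- when idx1 = idx2, the second accumulator of A never changes
lemma foldA_snd_const (idx : Int) (xs : List (List (String × Int))) (st : Int × Int) :
    (xs.foldl (stepA idx idx) st).2 = st.2 := by
  induction xs generalizing st with
  | nil => rfl
  | cons x xs ih =>
    simp only [List.foldl_cons]
    rw [ih]
    unfold stepA
    cases pvKey? x "sentence_idx" with
    | none => rfl
    | some si =>
      by_cases h : idx = si
      · simp only [if_pos h]
        cases pvKey? x "cluster_id" <;> rfl
      · simp only [if_neg h]

-- unfolding Source B's backward search one step (record with both keys present)
lemma lastCluster_cons (idx si c : Int) (x : List (String × Int)) (rest : List (List (String × Int)))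
    (hsi : pvKey? x "sentence_idx" = some si) (hcv : pvKey? x "cluster_id" = some c) :
    pvLastClusterOf idx (x :: rest) = if si = idx then c else pvLastClusterOf idx rest := by
  simp [pvLastClusterOf, hsi, hcv]

-- unfolding Source B's backward search one step (non-matching record; cluster_id not read)
lemma lastCluster_cons_ne (idx si : Int) (x : List (String × Int)) (rest : List (List (String × Int)))
    (hsi : pvKey? x "sentence_idx" = some si) (h : ¬ si = idx) :
    pvLastClusterOf idx (x :: rest) = pvLastClusterOf idx rest := by
  simp [pvLastClusterOf, hsi, h]

-- main invariant for idx1 ≠ idx2: A's forward accumulators equal B's backward searches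
lemma fold_eq_last (idx1 idx2 : Int) (hne : idx1 ≠ idx2)
    (xs : List (List (String × Int)))
    (hpre : ∀ s ∈ xs, ∃ si, pvKey? s "sentence_idx" = some si ∧
      ((si = idx1 ∨ si = idx2) → (pvKey? s "cluster_id").isSome)) :
    xs.foldl (stepA idx1 idx2) (-1, -1) =
      (pvLastClusterOf idx1 xs.reverse, pvLastClusterOf idx2 xs.reverse) := by
  induction xs using List.reverseRecOn with
  | nil => rfl
  | append_singleton xs x ih =>
    obtain ⟨si, hsi, hc⟩ := hpre x (by simp)
    have hpre' : ∀ s ∈ xs, ∃ si, pvKey? s "sentence_idx" = some si ∧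
        ((si = idx1 ∨ si = idx2) → (pvKey? s "cluster_id").isSome) :=
      fun s hmem => hpre s (by simp [hmem])
    rw [List.foldl_append, List.foldl_cons, List.foldl_nil, ih hpre',
        List.reverse_append]
    simp only [List.reverse_singleton, List.singleton_append]
    unfold stepA
    by_cases h1 : idx1 = si
    · obtain ⟨c, hcv⟩ := Option.isSome_iff_exists.mp (hc (Or.inl h1.symm))
      rw [lastCluster_cons idx1 si c x xs.reverse hsi hcv,
          lastCluster_cons idx2 si c x xs.reverse hsi hcv]
      simp only [hsi, hcv]
      rw [if_pos h1, if_pos h1.symm, if_neg (show ¬ si = idx2 from fun h => hne (h1.trans h))]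
    · by_cases h2 : idx2 = si
      · obtain ⟨c, hcv⟩ := Option.isSome_iff_exists.mp (hc (Or.inr h2.symm))
        rw [lastCluster_cons idx1 si c x xs.reverse hsi hcv,
            lastCluster_cons idx2 si c x xs.reverse hsi hcv]
        simp only [hsi, hcv]
        rw [if_neg h1, if_pos h2, if_neg (show ¬ si = idx1 from fun h => h1 h.symm),
            if_pos h2.symm]
      · rw [lastCluster_cons_ne idx1 si x xs.reverse hsi (fun h => h1 h.symm),
            lastCluster_cons_ne idx2 si x xs.reverse hsi (fun h => h2 h.symm)]
        simp only [hsi]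
        rw [if_neg h1, if_neg h2]

-- ===== VERDICT (by name: the statement is the Claim_ definition above) =====
theorem determine_subject_change_spec : Claim_equal_determine_subject_change := by
  intro subjects idx1 idx2 _ hpre
  unfold Spec_determine_subject_change determine_subject_change_alt
  rw [portA_eq]
  have hpre' : ∀ s ∈ subjects, ∃ si, pvKey? s "sentence_idx" = some si ∧
      ((si = idx1 ∨ si = idx2) → (pvKey? s "cluster_id").isSome) := by
    intro s hmem
    have h := List.all_eq_true.mp hpre s hmem
    cases hk : pvKey? s "sentence_idx" with
    | none => rw [hk] at h; exact absurd h (by simp)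
    | some si =>
      rw [hk] at h
      refine ⟨si, rfl, fun hor => ?_⟩
      have : (si == idx1 || si == idx2) = true := by
        rcases hor with h' | h' <;> simp [h']
      simpa [this] using h
  by_cases hne : idx1 = idx2
  · subst hne
    have h2 := foldA_snd_const idx1 subjects (-1, -1)
    simp [h2]
  · rw [fold_eq_last idx1 idx2 hne subjects hpre']
    set c1 := pvLastClusterOf idx1 subjects.reverse
    set c2 := pvLastClusterOf idx2 subjects.reverse
    by_cases hc1 : c1 = -1 <;> by_cases hc2 : c2 = -1 <;> by_cases h12 : c1 = c2 <;>
      simp [hc1, hc2, h12]
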